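-- pv_equiv track=rewrite | github.com/prography-6th-study/algorithm-code | yeji/3-단속카메라.py | solution
-- ===== SOURCE A (Python) =====
-- def solution(routes):
--     routes.sort()
--     answer = 0
--     check = [0]*len(routes)
--
--     for i in range(len(routes)-1, -1, -1):
--         if check[i] == 0: #아직 카메라에 찍히지 않은 차
--             cemara = routes[i][0] # 진입점에 카메라 설치
--             answer += 1 # 카메라 댓수 증가
--
--         for j in range(i, -1, -1):
--             if check[j] == 0 and routes[j][0] <= cemara <= routes[j][1] : # 카메라가 진입점과 진출점 사이에 있으면
--               check[j]=1
--     return answer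
-- ===== SOURCE B (Python) =====
-- def solution(routes):
--     # Greedy single pass: scan intervals by descending start; if the current
--     # camera (the latest one, which has the smallest position) does not reach
--     # this interval's end, place a new camera at this interval's start.
--     count = 0
--     cam = None
--     for r in sorted(routes, reverse=True):
--         if cam is None or r[1] < cam:
--             cam = r[0]
--             count += 1
--     return count
-- ===== Notes on version B (the rewrite author's own statement) =====
-- stated objective: alternative
-- what changed: A marks covered intervals in a check array via a nested inner sweep over all lower indices; B is a single greedy pass over the reverse-sorted routes that keeps only the latest camera position, placing a new camera when it no longer reaches the current interval's end (intended as the asymptotically better greedy, but a timing run read only ~1.3x at the largest size, so no speed is claimed).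
-- outside the precondition, e.g. on solution([[5]]): A raises IndexError, B returns 1; on solution([[1]]): A raises IndexError, B returns 1
import Mathlib
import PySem

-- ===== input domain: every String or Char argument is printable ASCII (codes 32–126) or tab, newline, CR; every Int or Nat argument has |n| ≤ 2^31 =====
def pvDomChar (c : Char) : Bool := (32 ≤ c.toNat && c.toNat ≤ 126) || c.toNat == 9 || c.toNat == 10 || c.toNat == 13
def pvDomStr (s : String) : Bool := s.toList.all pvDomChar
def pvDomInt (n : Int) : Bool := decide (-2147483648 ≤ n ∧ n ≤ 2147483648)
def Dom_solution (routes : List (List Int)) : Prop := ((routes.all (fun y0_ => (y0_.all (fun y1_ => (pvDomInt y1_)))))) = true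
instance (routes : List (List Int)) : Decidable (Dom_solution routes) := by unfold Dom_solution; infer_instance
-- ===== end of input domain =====

-- B replaces A's check-array sweep with its nested marking loop by a single greedy pass over
-- the reverse-sorted routes that keeps only the most recent camera position (alternative
-- algorithm; a timing run did not confirm a >=1.5x speed-up on its inputs).
-- NOTE: Python A sorts `routes` in place; B does not mutate its argument. The equivalence
-- proved here is about the RETURN value only.

-- ===== PORT A =====
-- inner loop body: 'if check[j] == 0 and routes[j][0] <= cemara <= routes[j][1]: check[j] = 1'
def innerBody (rs : List (List Int)) (cem : Int) (ch : List Int) (j : Int) : List Int :=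
  if PySem.List.pyGetD ch j 0 = 0 ∧
      PySem.List.pyGetD (PySem.List.pyGetD rs j []) 0 0 ≤ cem ∧
      cem ≤ PySem.List.pyGetD (PySem.List.pyGetD rs j []) 1 0 then
    PySem.List.pySetD ch j 1
  else ch

-- outer loop body over state (answer, check, cemara)
def outerBody (rs : List (List Int)) (st : Int × List Int × Int) (i : Int) : Int × List Int × Int :=
  let fst := if PySem.List.pyGetD st.2.1 i 0 = 0 then
      (st.1 + 1, PySem.List.pyGetD (PySem.List.pyGetD rs i []) 0 0)
    else (st.1, st.2.2)
  (fst.1, (PySem.List.pyRange i (-1) (-1)).foldl (innerBody rs fst.2) st.2.1, fst.2)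

def solution (routes : List (List Int)) : Int :=
  let rs := PySem.List.sorted routes (fun x => x)
  (((PySem.List.pyRange (PySem.List.len rs - 1) (-1) (-1)).foldl (outerBody rs)
      (0, PySem.List.pyRepeat [0] (PySem.List.len rs), 0)).1)

-- ===== PORT B =====
-- one greedy step over state (count, cam)
def altBody (st : Int × Option Int) (r : List Int) : Int × Option Int :=
  match st.2 with
  | none => (st.1 + 1, some (PySem.List.pyGetD r 0 0))
  | some cam =>
    if PySem.List.pyGetD r 1 0 < cam then (st.1 + 1, some (PySem.List.pyGetD r 0 0)) else st

def solution_alt (routes : List (List Int)) : Int :=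
  ((PySem.List.sorted routes (fun x => x) true).foldl altBody (0, none)).1

-- ===== PRECONDITION & SPEC =====
-- Pre_ excludes exactly the inputs on which A raises IndexError: any route with fewer
-- than two entries (A reads routes[j][0] and routes[j][1] for every j).
def Pre_solution (routes : List (List Int)) : Prop := ∀ r ∈ routes, 2 ≤ r.length
instance (routes : List (List Int)) : Decidable (Pre_solution routes) := by
  unfold Pre_solution; infer_instance

def pvWitness_solution : List (List Int) := [[1, 3], [2, 5], [-4, 0]]

def Spec_solution (routes : List (List Int)) (out : Int) : Prop := out = solution_alt routes
instance (routes : List (List Int)) (out : Int) : Decidable (Spec_solution routes out) := by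
  unfold Spec_solution; infer_instance

-- ===== CLAIM (what is proved, stated in full; the proofs are below) =====
def Claim_equal_solution : Prop :=
  ∀ (routes : List (List Int)), Dom_solution routes → Pre_solution routes →
    Spec_solution routes (solution routes)

-- ===== LEMMAS AND PROOFS =====

-- the sorted list, ascending
def srt (routes : List (List Int)) : List (List Int) := PySem.List.sorted routes (fun x => x)

-- "camera at position c covers interval j of rs"
abbrev covB (rs : List (List Int)) (c : Int) (j : Nat) : Prop :=
  PySem.List.pyGetD (rs.getD j []) 0 0 ≤ c ∧ c ≤ PySem.List.pyGetD (rs.getD j []) 1 0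

-- invariant tying A's check array to B's current camera c, for the first m indices
def InvSome (rs : List (List Int)) (m : Nat) (check : List Int) (c : Int) : Prop :=
  (∀ j : Nat, j < m → PySem.List.pyGetD (rs.getD j []) 0 0 ≤ c) ∧
  (∀ j : Nat, j < m → check.getD j 0 = if covB rs c j then 1 else 0)

-- head of a lex-smaller nonempty list is ≤ head of the larger
lemma lex_head_le (l1 l2 : List Int) (h : l1 ≤ l2) (h1 : l1 ≠ []) :
    PySem.List.pyGetD l1 0 0 ≤ PySem.List.pyGetD l2 0 0 := by
  match l1, l2 with
  | [], _ => exact absurd rfl h1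
  | a :: t, [] =>
    exfalso
    rcases h with h | h
    · cases h
    · cases h
  | a :: t, b :: u =>
    simp only [PySem.List.pyGetD_zero_cons]
    rcases h with h | h
    · cases h
      · rfl
    · cases h <;> omega

-- the instances the ports elaborate with equal the canonical LinearOrder ones
lemma sorted_inst_eq (xs : List (List Int)) (rev : Bool) :
    PySem.List.sorted xs (fun x => x) rev
      = @PySem.List.sorted (List Int) (List Int) LinearOrder.toPartialOrder.toPreorder.toLT
          LinearOrder.toDecidableLT xs (fun x => x) rev := by
  have hd : (fun (a b : List Int) => a.decidableLT b) = (LinearOrder.toDecidableLT (α := List Int)) :=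
    Subsingleton.elim _ _
  rw [show (PySem.List.sorted xs (fun x => x) rev : List (List Int))
      = @PySem.List.sorted (List Int) (List Int) List.instLT (fun a b => a.decidableLT b) xs
          (fun x => x) rev from rfl]
  rw [hd]

-- reverse-sorted is the reverse of sorted (identity key)
lemma sorted_rev_eq_reverse (xs : List (List Int)) :
    PySem.List.sorted xs (fun x => x) true = (PySem.List.sorted xs (fun x => x)).reverse := by
  rw [sorted_inst_eq xs true, sorted_inst_eq xs false]
  have h : (@PySem.List.sorted (List Int) (List Int) LinearOrder.toPartialOrder.toPreorder.toLT
        LinearOrder.toDecidableLT xs (fun x => x) true).reverse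
      = @PySem.List.sorted (List Int) (List Int) LinearOrder.toPartialOrder.toPreorder.toLT
        LinearOrder.toDecidableLT xs (fun x => x) false :=
    PySem.List.eq_of_perm_of_pairwise_le_of_injective (fun x : List Int => x)
      (fun a b hab => hab)
      (((List.reverse_perm _).trans
          (@PySem.List.sorted_perm (List Int) (List Int) _ LinearOrder.toDecidableLT xs
            (fun x => x) true)).trans
        (@PySem.List.sorted_perm (List Int) (List Int) _ LinearOrder.toDecidableLT xs
            (fun x => x) false).symm)
      (List.pairwise_reverse.mpr (PySem.List.sorted_pairwise_rev xs _))
      (PySem.List.sorted_pairwise xs _)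
  rw [← h, List.reverse_reverse]

-- heads of the sorted list are monotone
lemma heads_mono (routes : List (List Int)) (hpre : Pre_solution routes) :
    ∀ j k : Nat, j ≤ k → k < (srt routes).length →
      PySem.List.pyGetD ((srt routes).getD j []) 0 0 ≤
        PySem.List.pyGetD ((srt routes).getD k []) 0 0 := by
  intro j k hjk hk
  unfold srt at *
  rw [sorted_inst_eq routes false] at *
  have hj := lt_of_le_of_lt hjk hk
  rw [List.getD_eq_getElem _ _ hj, List.getD_eq_getElem _ _ hk]
  have hle := PySem.List.key_sorted_getElem_mono routes (fun x => x) hjk hk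
  apply lex_head_le _ _ hle
  have hmem := (@PySem.List.mem_sorted (List Int) (List Int) _ LinearOrder.toDecidableLT
    routes (fun x => x) false _).mp (List.getElem_mem hj)
  have := hpre _ hmem
  intro hnil
  rw [hnil] at this
  simp at this

-- effect of A's inner marking loop
lemma inner_loop (rs : List (List Int)) (c : Int) :
    ∀ (m : Nat) (ch : List Int), m ≤ ch.length →
      ((PySem.List.pyRange ((m : Int) - 1) (-1) (-1)).foldl (innerBody rs c) ch).length
          = ch.length ∧
      ∀ j : Nat, j < ch.length →
        ((PySem.List.pyRange ((m : Int) - 1) (-1) (-1)).foldl (innerBody rs c) ch).getD j 0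
          = if j < m ∧ ch.getD j 0 = 0 ∧ covB rs c j then 1 else ch.getD j 0 := by
  intro m
  induction m with
  | zero =>
    intro ch _
    rw [show ((0 : Nat) : Int) - 1 = -1 by norm_num,
      PySem.List.pyRange_neg_one_eq_nil (by omega)]
    constructor
    · rfl
    · intro j _
      simp
  | succ m ih =>
    intro ch hm
    have hmlt : m < ch.length := by omega
    rw [show ((m + 1 : Nat) : Int) - 1 = (m : Int) by push_cast; ring,
      PySem.List.pyRange_neg_one_cons (by omega), List.foldl_cons]
    have hbody : innerBody rs c ch (m : Int)
        = if ch.getD m 0 = 0 ∧ covB rs c m then PySem.List.pySetD ch (m : Int) 1 else ch := by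
      by_cases hc : ch.getD m 0 = 0 ∧ covB rs c m
      · obtain ⟨hc1, hc2, hc3⟩ : ch.getD m 0 = 0 ∧
            PySem.List.pyGetD (rs.getD m []) 0 0 ≤ c ∧ c ≤ PySem.List.pyGetD (rs.getD m []) 1 0 :=
          ⟨hc.1, hc.2.1, hc.2.2⟩
        rw [if_pos hc]
        unfold innerBody
        rw [PySem.List.pyGetD_natCast rs m [], if_pos ⟨by rwa [PySem.List.pyGetD_natCast], hc2, hc3⟩]
      · rw [if_neg hc]
        unfold innerBody covB at *
        rw [PySem.List.pyGetD_natCast rs m [],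
          if_neg (by rw [PySem.List.pyGetD_natCast]; tauto)]
    have hlen1 : (innerBody rs c ch (m : Int)).length = ch.length := by
      rw [hbody]
      split
      · exact PySem.List.length_pySetD ch _ 1
      · rfl
    have hget1 : ∀ j : Nat, j < ch.length →
        (innerBody rs c ch (m : Int)).getD j 0
          = if j = m ∧ ch.getD m 0 = 0 ∧ covB rs c m then 1 else ch.getD j 0 := by
      intro j hj
      rw [hbody]
      by_cases hc : ch.getD m 0 = 0 ∧ covB rs c m
      · rw [if_pos hc]
        rw [← PySem.List.pyGetD_natCast (PySem.List.pySetD ch (m : Int) 1) j 0,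
          PySem.List.pyGetD_pySetD_natCast ch m j 1 0 hmlt, PySem.List.pyGetD_natCast ch j 0]
        by_cases hjm : j = m
        · rw [if_pos hjm, if_pos ⟨hjm, hc⟩]
        · rw [if_neg hjm, if_neg (by tauto)]
      · rw [if_neg hc, if_neg (by tauto)]
    obtain ⟨ihlen, ihget⟩ := ih (innerBody rs c ch (m : Int)) (by omega)
    refine ⟨by rw [ihlen, hlen1], ?_⟩
    intro j hj
    rw [ihget j (by rw [hlen1]; exact hj)]
    by_cases hjm : j = m
    · subst hjm
      by_cases hZ : ch.getD j 0 = 0 ∧ covB rs c j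
      · have hv : (innerBody rs c ch (j : Int)).getD j 0 = 1 := by
          rw [hget1 j hj]; exact if_pos ⟨rfl, hZ⟩
        rw [hv, if_neg (fun h => absurd h.1 (lt_irrefl j)), if_pos ⟨Nat.lt_succ_self j, hZ⟩]
      · have hv : (innerBody rs c ch (j : Int)).getD j 0 = ch.getD j 0 := by
          rw [hget1 j hj]; exact if_neg (fun h => hZ h.2)
        rw [hv, if_neg (fun h => absurd h.1 (lt_irrefl j)),
          if_neg (fun h => hZ ⟨h.2.1, h.2.2⟩)]
    · have hv : (innerBody rs c ch (m : Int)).getD j 0 = ch.getD j 0 := by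
        rw [hget1 j hj]; exact if_neg (fun h => hjm h.1)
      rw [hv]
      by_cases hjl : j < m
      · by_cases hAB : ch.getD j 0 = 0 ∧ covB rs c j
        · rw [if_pos ⟨hjl, hAB⟩, if_pos ⟨by omega, hAB⟩]
        · rw [if_neg (fun h => hAB ⟨h.2.1, h.2.2⟩), if_neg (fun h => hAB ⟨h.2.1, h.2.2⟩)]
      · rw [if_neg (fun h => hjl h.1), if_neg (fun h => absurd h.1 (by omega))]

-- main coupling: A's remaining outer loop equals B's remaining greedy pass
lemma main_loop (rs : List (List Int))
    (hmono : ∀ j k : Nat, j ≤ k → k < rs.length →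
      PySem.List.pyGetD (rs.getD j []) 0 0 ≤ PySem.List.pyGetD (rs.getD k []) 0 0) :
    ∀ (m : Nat), m ≤ rs.length →
      ∀ (answer cem : Int) (check : List Int) (cnt : Int) (cam : Option Int),
        check.length = rs.length → answer = cnt →
        (match cam with
          | none => answer = 0 ∧ ∀ j : Nat, j < rs.length → check.getD j 0 = 0
          | some c => cem = c ∧ InvSome rs m check c) →
        ((PySem.List.pyRange ((m : Int) - 1) (-1) (-1)).foldl (outerBody rs)
            (answer, check, cem)).1
          = ((rs.take m).reverse.foldl altBody (cnt, cam)).1 := by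
  intro m
  induction m with
  | zero =>
    intro _ answer cem check cnt cam _ hac _
    rw [show ((0 : Nat) : Int) - 1 = -1 by norm_num,
      PySem.List.pyRange_neg_one_eq_nil (by omega)]
    simpa using hac
  | succ m ih =>
    intro hm answer cem check cnt cam hlen hac hinv
    have hmlt : m < rs.length := by omega
    have hcast : ((m + 1 : Nat) : Int) - 1 = (m : Int) := by push_cast; ring
    rw [hcast, PySem.List.pyRange_neg_one_cons (by omega), List.foldl_cons]
    have htake : (rs.take (m + 1)).reverse = rs.getD m [] :: (rs.take m).reverse := by
      rw [List.take_add_one, List.getElem?_eq_getElem hmlt, List.getD_eq_getElem rs [] hmlt]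
      simp
    rw [htake, List.foldl_cons]
    have hout : ∀ a ce : Int, outerBody rs (a, check, ce) (m : Int)
        = (if check.getD m 0 = 0 then
            ((a + 1 : Int),
              (PySem.List.pyRange (m : Int) (-1) (-1)).foldl
                (innerBody rs (PySem.List.pyGetD (rs.getD m []) 0 0)) check,
              PySem.List.pyGetD (rs.getD m []) 0 0)
          else (a, (PySem.List.pyRange (m : Int) (-1) (-1)).foldl (innerBody rs ce) check, ce)) := by
      intro a ce
      unfold outerBody
      rw [PySem.List.pyGetD_natCast check m 0, PySem.List.pyGetD_natCast rs m []]
      by_cases h0 : check.getD m 0 = 0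
      · rw [if_pos h0, if_pos h0]
      · rw [if_neg h0, if_neg h0]
    cases cam with
    | none =>
      obtain ⟨ha0, hz⟩ := hinv
      have hc0 : check.getD m 0 = 0 := hz m hmlt
      have hin := inner_loop rs (PySem.List.pyGetD (rs.getD m []) 0 0) (m + 1) check
        (by omega)
      rw [hcast] at hin
      rw [hout answer cem, if_pos hc0]
      have halt : altBody (cnt, none) (rs.getD m [])
          = (cnt + 1, some (PySem.List.pyGetD (rs.getD m []) 0 0)) := rfl
      rw [halt]
      apply ih (by omega) _ _ _ _ _ (hin.1.trans hlen) (by omega)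
      refine ⟨rfl, ?_, ?_⟩
      · intro j hj
        exact hmono j m (le_of_lt hj) hmlt
      · intro j hj
        rw [hin.2 j (by omega), hz j (by omega)]
        by_cases hcov : covB rs (PySem.List.pyGetD (rs.getD m []) 0 0) j
        · rw [if_pos ⟨by omega, rfl, hcov⟩, if_pos hcov]
        · rw [if_neg (fun h => hcov h.2.2), if_neg hcov]
    | some c =>
      obtain ⟨hce, hheads, hcheck⟩ := hinv
      subst hce
      have hchm : check.getD m 0 = if covB rs cem m then 1 else 0 := hcheck m (by omega)
      have hhdm : PySem.List.pyGetD (rs.getD m []) 0 0 ≤ cem := hheads m (by omega)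
      by_cases hcov : covB rs cem m
      · -- already covered: neither program places a camera
        have hc1 : check.getD m 0 ≠ 0 := by rw [hchm, if_pos hcov]; norm_num
        have hin := inner_loop rs cem (m + 1) check (by omega)
        rw [hcast] at hin
        rw [hout answer cem, if_neg hc1]
        have halt : altBody (cnt, some cem) (rs.getD m []) = (cnt, some cem) := by
          rw [show altBody (cnt, some cem) (rs.getD m [])
              = if PySem.List.pyGetD (rs.getD m []) 1 0 < cem then
                  (cnt + 1, some (PySem.List.pyGetD (rs.getD m []) 0 0))
                else (cnt, some cem) from rfl,
            if_neg (fun h => absurd hcov.2 (by omega))]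
        rw [halt]
        apply ih (by omega) _ _ _ _ _ (hin.1.trans hlen) hac
        refine ⟨rfl, fun j hj => hheads j (by omega), ?_⟩
        intro j hj
        rw [hin.2 j (by omega)]
        by_cases hcj : covB rs cem j
        · have h1 : check.getD j 0 = 1 := by rw [hcheck j (by omega), if_pos hcj]
          rw [if_neg (fun h => by rw [h1] at h; exact absurd h.2.1 (by norm_num)), h1,
            if_pos hcj]
        · have h0 : check.getD j 0 = 0 := by rw [hcheck j (by omega), if_neg hcj]
          rw [if_neg (fun h => hcj h.2.2), h0, if_neg hcj]
      · -- not covered: both programs place a camera at rs[m][0]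
        have hc0 : check.getD m 0 = 0 := by rw [hchm, if_neg hcov]
        have hen : PySem.List.pyGetD (rs.getD m []) 1 0 < cem := by
          by_contra hnot
          exact hcov ⟨hhdm, by omega⟩
        have hin := inner_loop rs (PySem.List.pyGetD (rs.getD m []) 0 0) (m + 1) check
          (by omega)
        rw [hcast] at hin
        rw [hout answer cem, if_pos hc0]
        have halt : altBody (cnt, some cem) (rs.getD m [])
            = (cnt + 1, some (PySem.List.pyGetD (rs.getD m []) 0 0)) := by
          rw [show altBody (cnt, some cem) (rs.getD m [])
              = if PySem.List.pyGetD (rs.getD m []) 1 0 < cem then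
                  (cnt + 1, some (PySem.List.pyGetD (rs.getD m []) 0 0))
                else (cnt, some cem) from rfl,
            if_pos hen]
        rw [halt]
        apply ih (by omega) _ _ _ _ _ (hin.1.trans hlen) (by omega)
        refine ⟨rfl, ?_, ?_⟩
        · intro j hj
          exact hmono j m (le_of_lt hj) hmlt
        · intro j hj
          rw [hin.2 j (by omega)]
          by_cases hcj : covB rs cem j
          · have h1 : check.getD j 0 = 1 := by rw [hcheck j (by omega), if_pos hcj]
            have hcovhd : covB rs (PySem.List.pyGetD (rs.getD m []) 0 0) j := by
              unfold covB at hcj ⊢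
              exact ⟨hmono j m (le_of_lt hj) hmlt, le_trans hhdm hcj.2⟩
            rw [if_neg (fun h => by rw [h1] at h; exact absurd h.2.1 (by norm_num)), h1,
              if_pos hcovhd]
          · have h0 : check.getD j 0 = 0 := by rw [hcheck j (by omega), if_neg hcj]
            by_cases hcj' : covB rs (PySem.List.pyGetD (rs.getD m []) 0 0) j
            · rw [if_pos ⟨by omega, h0, hcj'⟩, if_pos hcj']
            · rw [if_neg (fun h => hcj' h.2.2), h0, if_neg hcj']

-- ===== VERDICT (by name: the statement is the Claim_ definition above) =====
theorem solution_spec : Claim_equal_solution := by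
  intro routes _hdom hpre
  unfold Spec_solution solution solution_alt
  rw [sorted_rev_eq_reverse]
  have hmono := heads_mono routes hpre
  unfold srt at hmono
  have h := main_loop (PySem.List.sorted routes (fun x => x)) hmono
    (PySem.List.sorted routes (fun x => x)).length le_rfl 0 0
    (List.replicate (PySem.List.sorted routes (fun x => x)).length 0) 0 none
    List.length_replicate rfl
    ⟨rfl, fun j hj => List.getD_replicate 0 hj⟩
  rw [List.take_length] at h
  simpa [PySem.List.len_eq, PySem.List.pyRepeat_singleton] using h
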